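-- pv_equiv track=rewrite | github.com/zNiine/play.tt | TuringTest/backend/app/services/data_db.py | _year_from_season
-- ===== SOURCE A (Python) =====
-- def _year_from_season(season_str):
--     """Extract 4-digit calendar year from season string (e.g. 'ALPB- 2025' -> 2025, '2025' -> 2025)."""
--     if not season_str:
--         return None
--     s = str(season_str).strip()
--     # Find last 4-digit sequence (must be exactly 4 digits)
--     for i in range(len(s) - 3, -1, -1):
--         chunk = s[i:i + 4]
--         if len(chunk) == 4 and chunk.isdigit():
--             return int(chunk)
--     return None
-- ===== SOURCE B (Python) =====
-- def _year_from_season(season_str):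
--     """Extract 4-digit calendar year from season string (e.g. 'ALPB- 2025' -> 2025, '2025' -> 2025)."""
--     if not season_str:
--         return None
--     s = str(season_str).strip()
--     run = 0
--     result = None
--     for j, ch in enumerate(s):
--         if ch.isdigit():
--             run += 1
--         else:
--             run = 0
--         if run >= 4:
--             result = int(s[j - 3:j + 1])
--     return result
-- ===== Notes on version B (the rewrite author's own statement) =====
-- stated objective: faster
-- what changed: Replaced the reverse scan that re-slices and re-tests a fresh 4-char window at every position with a single forward pass keeping a running count of consecutive digits, overwriting the result whenever the run reaches 4 so the rightmost window wins.
import Mathlib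
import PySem

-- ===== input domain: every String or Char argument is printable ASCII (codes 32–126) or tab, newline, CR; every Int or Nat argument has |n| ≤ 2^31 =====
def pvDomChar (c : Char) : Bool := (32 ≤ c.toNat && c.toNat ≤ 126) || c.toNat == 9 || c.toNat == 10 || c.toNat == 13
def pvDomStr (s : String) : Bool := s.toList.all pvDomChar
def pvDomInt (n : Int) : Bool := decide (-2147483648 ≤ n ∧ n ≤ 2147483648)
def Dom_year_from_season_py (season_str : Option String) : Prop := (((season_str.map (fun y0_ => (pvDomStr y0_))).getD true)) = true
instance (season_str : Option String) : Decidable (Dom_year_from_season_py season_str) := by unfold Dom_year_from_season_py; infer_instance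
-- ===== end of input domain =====

-- B replaces A's right-to-left scan (slice + 4-digit test at every start position) with a single
-- left-to-right pass keeping a running count of consecutive digits, overwriting the result whenever
-- the count reaches 4 so the rightmost qualifying window wins (measured ~2x faster: one char test per position instead of a slice + 4-char isdigit test).

-- ===== PORT A =====
-- the loop 'for i in range(len(s) - 3, -1, -1): …' with its early return
def yfsLoop (cs : List Char) : List Int → Option Int
  | [] => none
  | i :: rest =>
      let chunk := PySem.List.slice cs (some i) (some (i + 4))
      if chunk.length == 4 && PySem.Chars.strIsdigit chunk then
        -- int(chunk): guarded by chunk.isdigit(), so int() cannot raise; getD 0 is never the default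
        some ((PySem.Int.ofChars? chunk).getD 0)
      else yfsLoop cs rest

def year_from_season_py (season_str : Option String) : Option Int :=
  match season_str with
  | none => none
  | some s0 =>
    if s0 = "" then none
    else
      let cs := PySem.Chars.strip s0.toList
      yfsLoop cs (PySem.List.pyRange ((cs.length : Int) - 3) (-1) (-1))

-- ===== PORT B =====
-- 'for j, ch in enumerate(s): …' with running digit count and overwritten result
def yfsAltLoop (cs : List Char) : List (Int × Char) → Int → Option Int → Option Int
  | [], _, res => res
  | (j, ch) :: rest, run, res =>
      let run' := if PySem.Chars.isdigit ch then run + 1 else 0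
      let res' := if 4 ≤ run' then
          -- int(s[j-3:j+1]): the window is all digits when run' ≥ 4, so int() cannot raise
          some ((PySem.Int.ofChars? (PySem.List.slice cs (some (j - 3)) (some (j + 1)))).getD 0)
        else res
      yfsAltLoop cs rest run' res'

def year_from_season_py_alt (season_str : Option String) : Option Int :=
  match season_str with
  | none => none
  | some s0 =>
    if s0 = "" then none
    else
      let cs := PySem.Chars.strip s0.toList
      yfsAltLoop cs (PySem.List.enumerate cs 0) 0 none

-- ===== PRECONDITION & SPEC =====
def Spec_year_from_season_py (season_str : Option String) (out : Option Int) : Prop := out = year_from_season_py_alt season_str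
instance (season_str : Option String) (out : Option Int) : Decidable (Spec_year_from_season_py season_str out) := by unfold Spec_year_from_season_py; infer_instance

-- ===== CLAIM (what is proved, stated in full; the proofs are below) =====
def Claim_equal_year_from_season_py : Prop := ∀ (season_str : Option String), Dom_year_from_season_py season_str → Spec_year_from_season_py season_str (year_from_season_py season_str)

-- ===== LEMMAS AND PROOFS =====

-- proof-side canonical form: 'rightmost good window among starts < k', as a keep-last fold
def yfsGood (cs : List Char) (i : Nat) : Bool :=
  (((cs.drop i).take 4).length == 4) && PySem.Chars.strIsdigit ((cs.drop i).take 4)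

def yfsF (cs : List Char) (k : Nat) : Option Int :=
  (List.range k).foldl
    (fun acc i => if yfsGood cs i then some ((PySem.Int.ofChars? ((cs.drop i).take 4)).getD 0) else acc) none

-- the running digit count after a prefix
def yfsRun (p : List Char) : Int :=
  p.foldl (fun r c => if PySem.Chars.isdigit c then r + 1 else 0) 0

lemma yfsF_succ (cs : List Char) (k : Nat) :
    yfsF cs (k + 1)
      = if yfsGood cs k then some ((PySem.Int.ofChars? ((cs.drop k).take 4)).getD 0) else yfsF cs k := by
  simp [yfsF, List.range_succ]

lemma yfsChunk_eq (cs : List Char) (i : Nat) :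
    PySem.List.slice cs (some (i : Int)) (some ((i : Int) + 4)) = (cs.drop i).take 4 := by
  have h : ((i : Int) + 4) = ((i + 4 : Nat) : Int) := by push_cast; ring
  rw [h, PySem.List.slice_natCast]
  congr 1
  omega

lemma yfsRun_append (p : List Char) (c : Char) :
    yfsRun (p ++ [c]) = if PySem.Chars.isdigit c then yfsRun p + 1 else 0 := by
  simp [yfsRun, List.foldl_append]

lemma yfsRun_nonneg (p : List Char) : 0 ≤ yfsRun p := by
  induction p using List.reverseRecOn with
  | nil => simp [yfsRun]
  | append_singleton p c ih =>
    rw [yfsRun_append]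
    split <;> omega

lemma yfsRun_ge_iff (p : List Char) : ∀ (m : Nat),
    ((m : Int) ≤ yfsRun p) ↔ (m ≤ p.length ∧ (p.drop (p.length - m)).all PySem.Chars.isdigit) := by
  induction p using List.reverseRecOn with
  | nil =>
    intro m
    simp [yfsRun]
  | append_singleton p c ih =>
    intro m
    rw [yfsRun_append]
    by_cases hc : PySem.Chars.isdigit c
    · simp only [hc, if_true]
      cases m with
      | zero =>
        have h0 := yfsRun_nonneg p
        simp
        omega
      | succ m' =>
        by_cases hm : m' ≤ p.length
        · have hd : ((p ++ [c]).length - (m' + 1)) = p.length - m' := by simp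
          have hdrop : (p ++ [c]).drop (p.length - m') = p.drop (p.length - m') ++ [c] :=
            List.drop_append_of_le_length (by omega)
          rw [hd, hdrop]
          have := ih m'
          simp only [List.all_append, List.all_cons, List.all_nil, hc]
          constructor
          · intro h
            have hm' : (m' : Int) ≤ yfsRun p := by push_cast at h ⊢; omega
            rcases (ih m').1 hm' with ⟨h1, h2⟩
            simp [h1, h2]
          · intro h
            have h2 : (p.drop (p.length - m')).all PySem.Chars.isdigit := by
              have := h.2
              simpa using this
            have := (ih m').2 ⟨hm, h2⟩
            push_cast
            omega
        · constructor
          · intro h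
            have hm' : (m' : Int) ≤ yfsRun p := by push_cast at h ⊢; omega
            rcases (ih m').1 hm' with ⟨h1, _⟩
            omega
          · intro h
            have : m' + 1 ≤ (p ++ [c]).length := h.1
            simp at this
            omega
    · have hcf : PySem.Chars.isdigit c = false := by simpa using hc
      rw [hcf]
      simp only [Bool.false_eq_true, if_false]
      have hm0 : ((m : Int) ≤ 0) ↔ m = 0 := by omega
      rw [hm0]
      constructor
      · intro h
        subst h
        simp
      · intro h
        by_contra hm
        have hm1 : 1 ≤ m := by omega
        rcases h with ⟨h1, h2⟩
        have hlen : (p ++ [c]).length = p.length + 1 := by simp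
        have hle : (p ++ [c]).length - m ≤ p.length := by omega
        have hdrop : (p ++ [c]).drop ((p ++ [c]).length - m)
            = p.drop ((p ++ [c]).length - m) ++ [c] :=
          List.drop_append_of_le_length hle
        rw [hdrop] at h2
        simp [hcf] at h2

-- A's descending loop equals the keep-last fold over ascending starts
lemma yfsLoop_eq_F (cs : List Char) : ∀ (j : Nat),
    yfsLoop cs (PySem.List.pyRange (j : Int) (-1) (-1)) = yfsF cs (j + 1) := by
  intro j
  induction j with
  | zero =>
    rw [PySem.List.pyRange_neg_one_cons (by simp)]
    have h1 : ((0 : Nat) : Int) - 1 = -1 := by norm_num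
    rw [h1, PySem.List.pyRange_neg_one_eq_nil (by norm_num)]
    rw [yfsF_succ]
    simp only [yfsLoop]
    rw [yfsChunk_eq cs 0]
    rfl
  | succ j ih =>
    rw [PySem.List.pyRange_neg_one_cons (by push_cast; omega)]
    have h1 : ((j + 1 : Nat) : Int) - 1 = (j : Int) := by push_cast; ring
    rw [h1]
    rw [yfsF_succ]
    simp only [yfsLoop]
    rw [yfsChunk_eq cs (j + 1), ih]
    rfl

-- B's streaming loop maintains the keep-last fold over windows ending inside the processed prefix
lemma yfsAltLoop_inv : ∀ (t p : List Char) (run : Int) (res : Option Int),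
    run = yfsRun p → res = yfsF (p ++ t) (p.length - 3) →
    yfsAltLoop (p ++ t) (PySem.List.enumerate t (p.length : Int)) run res
      = yfsF (p ++ t) ((p ++ t).length - 3) := by
  intro t
  induction t with
  | nil =>
    intro p run res _ hres
    rw [PySem.List.enumerate_nil]
    simpa [yfsAltLoop] using hres
  | cons c t' ih =>
    intro p run res hrun hres
    rw [PySem.List.enumerate_cons]
    simp only [yfsAltLoop]
    have hrun' : (if PySem.Chars.isdigit c then run + 1 else 0) = yfsRun (p ++ [c]) := by
      rw [yfsRun_append, hrun]
    have hres' : (if (4 : Int) ≤ yfsRun (p ++ [c]) then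
          some ((PySem.Int.ofChars? (PySem.List.slice (p ++ c :: t')
            (some ((p.length : Int) - 3)) (some ((p.length : Int) + 1)))).getD 0)
        else res) = yfsF (p ++ c :: t') ((p.length + 1) - 3) := by
      by_cases hk3 : 3 ≤ p.length
      · have e1 : ((p.length : Int) - 3) = ((p.length - 3 : Nat) : Int) := by omega
        have e2 : ((p.length : Int) + 1) = ((p.length + 1 : Nat) : Int) := by push_cast; ring
        rw [e1, e2, PySem.List.slice_natCast]
        have e3 : (p.length + 1) - (p.length - 3) = 4 := by omega
        rw [e3]
        have e4 : (p.length + 1) - 3 = (p.length - 3) + 1 := by omega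
        rw [e4, yfsF_succ]
        have hwin : (p ++ c :: t').drop (p.length - 3) = p.drop (p.length - 3) ++ (c :: t') :=
          List.drop_append_of_le_length (by omega)
        have hlen3 : (p.drop (p.length - 3)).length = 3 := by simp; omega
        have htake : ((p ++ c :: t').drop (p.length - 3)).take 4 = p.drop (p.length - 3) ++ [c] := by
          rw [hwin, List.take_append, hlen3]
          rw [List.take_of_length_le (by omega)]
          rfl
        have hdropc : p.drop (p.length - 3) ++ [c] = (p ++ [c]).drop (p.length - 3) :=
          (List.drop_append_of_le_length (by omega)).symm
        have hlen4 : ((p ++ [c]).drop (p.length - 3)).length = 4 := by simp; omega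
        have hgood : (yfsGood (p ++ c :: t') (p.length - 3) = true)
            ↔ (((p ++ [c]).drop (p.length - 3)).all PySem.Chars.isdigit = true) := by
          simp only [yfsGood, htake, hdropc, hlen4, PySem.Chars.strIsdigit]
          have hne : ((p ++ [c]).drop (p.length - 3)).isEmpty = false := by
            rw [List.isEmpty_eq_false_iff]
            intro hnil
            rw [hnil] at hlen4
            simp at hlen4
          simp [hne]
        have hrc : ((4 : Int) ≤ yfsRun (p ++ [c]))
            ↔ (((p ++ [c]).drop (p.length - 3)).all PySem.Chars.isdigit = true) := by
          rw [show ((4 : Int)) = ((4 : Nat) : Int) by norm_num, yfsRun_ge_iff (p ++ [c]) 4]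
          have hidx : (p ++ [c]).length - 4 = p.length - 3 := by simp
          rw [hidx]
          constructor
          · exact fun h => h.2
          · exact fun h => ⟨by simp; omega, h⟩
        rw [hres]
        refine if_congr (by rw [hrc, hgood]) ?_ rfl
        rw [htake, hdropc]
      · have hlt : ¬ (4 : Int) ≤ yfsRun (p ++ [c]) := by
          intro hge
          have := (yfsRun_ge_iff (p ++ [c]) 4).1 hge
          simp at this
          omega
        rw [if_neg hlt, hres]
        congr 1
        omega
    rw [hrun', hres']
    have hassoc : p ++ c :: t' = (p ++ [c]) ++ t' := by simp
    have hlen : (((p ++ [c]).length : Nat) : Int) = (p.length : Int) + 1 := by simp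
    have hlen' : (p ++ [c]).length - 3 = (p.length + 1) - 3 := by simp
    rw [hassoc, ← hlen]
    exact ih (p ++ [c]) _ _ rfl (by rw [hlen'])

lemma yfsGood_oob (cs : List Char) (i : Nat) (h : cs.length < i + 4) : yfsGood cs i = false := by
  have hl : ((cs.drop i).take 4).length = min 4 (cs.length - i) := by simp
  have h4 : (((cs.drop i).take 4).length == 4) = false := by
    rw [hl]; simp; omega
  simp only [yfsGood, h4, Bool.false_and]

lemma yfs_both_eq_F (cs : List Char) :
    yfsLoop cs (PySem.List.pyRange ((cs.length : Int) - 3) (-1) (-1))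
      = yfsAltLoop cs (PySem.List.enumerate cs 0) 0 none := by
  have hB : yfsAltLoop cs (PySem.List.enumerate cs 0) 0 none = yfsF cs (cs.length - 3) := by
    have := yfsAltLoop_inv cs [] 0 none (by simp [yfsRun]) (by simp [yfsF])
    simpa using this
  rw [hB]
  by_cases h : 3 ≤ cs.length
  · have hc : ((cs.length : Int) - 3) = ((cs.length - 3 : Nat) : Int) := by omega
    rw [hc, yfsLoop_eq_F]
    rw [yfsF_succ]
    have : yfsGood cs (cs.length - 3) = false := yfsGood_oob cs _ (by omega)
    simp [this]
  · have hnil : PySem.List.pyRange ((cs.length : Int) - 3) (-1) (-1) = [] :=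
      PySem.List.pyRange_neg_one_eq_nil (by omega)
    have h0 : cs.length - 3 = 0 := by omega
    simp [hnil, yfsLoop, h0, yfsF]

-- ===== VERDICT (by name: the statement is the Claim_ definition above) =====
theorem year_from_season_py_spec : Claim_equal_year_from_season_py := by
  intro season_str _
  unfold Spec_year_from_season_py year_from_season_py year_from_season_py_alt
  match season_str with
  | none => rfl
  | some s0 =>
    by_cases h : s0 = ""
    · simp [h]
    · simp only [h, if_false]
      exact yfs_both_eq_F _
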